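-- pv_equiv track=rewrite | github.com/omarakhmedov-web/payeeproof-api | app.py | ordered_candidates
-- ===== SOURCE A (Python) =====
-- from typing import Any, Dict, List, Optional, Tuple
--
-- CHAIN_ALIASES = {
--     "eth": "ethereum",
--     "ethereum": "ethereum",
--     "mainnet": "ethereum",
--     "arb": "arbitrum",
--     "arbitrum": "arbitrum",
--     "base": "base",
--     "polygon": "polygon",
--     "matic": "polygon",
--     "bsc": "bsc",
--     "bnb": "bsc",
--     "bnb chain": "bsc",
--     "sol": "solana",
--     "solana": "solana",
-- }
--
-- def normalize_chain(value: str) -> str: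
--     raw = str(value or "").strip().lower()
--     return CHAIN_ALIASES.get(raw, raw)
--
-- def ordered_candidates(candidates: List[str], preferred: str = '') -> List[str]:
--     out: List[str] = []
--     preferred = normalize_chain(preferred)
--     if preferred and preferred in candidates:
--         out.append(preferred)
--     for item in candidates:
--         if item not in out:
--             out.append(item)
--     return out
-- ===== SOURCE B (Python) =====
-- CHAIN_ALIASES = {
--     "eth": "ethereum",
--     "ethereum": "ethereum",
--     "mainnet": "ethereum",
--     "arb": "arbitrum",
--     "arbitrum": "arbitrum",
--     "base": "base",
--     "polygon": "polygon",
--     "matic": "polygon",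
--     "bsc": "bsc",
--     "bnb": "bsc",
--     "bnb chain": "bsc",
--     "sol": "solana",
--     "solana": "solana",
-- }
--
-- def normalize_chain(value: str) -> str:
--     raw = str(value or "").strip().lower()
--     return CHAIN_ALIASES.get(raw, raw)
--
-- def ordered_candidates(candidates, preferred=''):
--     # Worklist dedup: repeatedly take the head and purge its duplicates from the
--     # remaining worklist; then hoist the normalized preferred chain to the front.
--     raw = str(preferred or "").strip().lower()
--     pref = CHAIN_ALIASES.get(raw, raw)
--     result = []
--     rest = list(candidates)
--     while rest:
--         head = rest[0]
--         result.append(head)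
--         rest = [y for y in rest[1:] if y != head]
--     if pref and pref in result:
--         result = [pref] + [c for c in result if c != pref]
--     return result
-- ===== Notes on version B (the rewrite author's own statement) =====
-- stated objective: alternative
-- what changed: A's single interleaved pass (seed out with preferred, then append-if-not-already-in-out scanning the growing output) is replaced by a worklist dedup that purges each head's duplicates from the remaining input, followed by a separate move-to-front of the normalized preferred chain.
import Mathlib
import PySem

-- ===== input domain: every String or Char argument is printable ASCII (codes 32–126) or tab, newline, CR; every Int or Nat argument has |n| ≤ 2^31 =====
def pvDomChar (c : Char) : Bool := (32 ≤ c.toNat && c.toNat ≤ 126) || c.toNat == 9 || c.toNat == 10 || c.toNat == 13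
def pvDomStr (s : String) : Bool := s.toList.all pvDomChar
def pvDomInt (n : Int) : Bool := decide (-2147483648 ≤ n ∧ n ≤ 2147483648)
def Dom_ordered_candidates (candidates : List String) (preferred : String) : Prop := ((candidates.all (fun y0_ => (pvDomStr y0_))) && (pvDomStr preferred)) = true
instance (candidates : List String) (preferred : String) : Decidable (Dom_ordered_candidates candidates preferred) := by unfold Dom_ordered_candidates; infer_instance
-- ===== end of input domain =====

-- B replaces A's interleaved prepend-then-append-if-absent pass with a worklist dedup
-- (purge the head's duplicates from the remaining input) followed by a separate
-- move-to-front phase (objective: alternative decomposition, same cost).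

-- ===== PORT A =====
def CHAIN_ALIASES : PySem.Dict String String := PySem.Dict.ofList [
  ("eth", "ethereum"), ("ethereum", "ethereum"), ("mainnet", "ethereum"),
  ("arb", "arbitrum"), ("arbitrum", "arbitrum"), ("base", "base"),
  ("polygon", "polygon"), ("matic", "polygon"), ("bsc", "bsc"),
  ("bnb", "bsc"), ("bnb chain", "bsc"), ("sol", "solana"), ("solana", "solana")]

def normalize_chain (value : String) : String :=
  let raw := PySem.Str.lower (PySem.Str.strip (if value == "" then "" else value))
  PySem.Dict.getD CHAIN_ALIASES raw raw

def ordered_candidates (candidates : List String) (preferred : String) : List String :=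
  let out : List String := []
  let preferred := normalize_chain preferred
  let out := if preferred ≠ "" ∧ candidates.contains preferred then out ++ [preferred] else out
  candidates.foldl (fun out item => if out.contains item then out else out ++ [item]) out

-- ===== PORT B =====
-- Source B's while loop: take the head, purge its duplicates from the rest of the worklist.
def dedupLoop (result : List String) (rest : List String) : List String :=
  match rest with
  | [] => result
  | head :: tail => dedupLoop (result ++ [head]) (tail.filter (fun y => y ≠ head))
termination_by rest.length
decreasing_by simp only [List.length_unattach, List.length_cons, Nat.lt_succ_iff]; exact le_trans (List.length_filter_le _ _) (by simp)

def ordered_candidates_alt (candidates : List String) (preferred : String) : List String :=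
  let raw := PySem.Str.lower (PySem.Str.strip (if preferred == "" then "" else preferred))
  let pref := PySem.Dict.getD CHAIN_ALIASES raw raw
  let result := dedupLoop [] candidates
  if pref ≠ "" ∧ result.contains pref then pref :: result.filter (fun c => c ≠ pref)
  else result

-- ===== PRECONDITION & SPEC =====
def Spec_ordered_candidates (candidates : List String) (preferred : String) (out : List String) : Prop := out = ordered_candidates_alt candidates preferred
instance (candidates : List String) (preferred : String) (out : List String) : Decidable (Spec_ordered_candidates candidates preferred out) := by unfold Spec_ordered_candidates; infer_instance

-- ===== CLAIM (what is proved, stated in full; the proofs are below) =====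
def Claim_equal_ordered_candidates : Prop := ∀ (candidates : List String) (preferred : String), Dom_ordered_candidates candidates preferred → Spec_ordered_candidates candidates preferred (ordered_candidates candidates preferred)

-- ===== LEMMAS AND PROOFS =====

-- proof-only bridge: pure recursive first-occurrence dedup
def dedupR : List String → List String
  | [] => []
  | x :: xs => x :: dedupR (xs.filter (fun y => y ≠ x))
termination_by xs => xs.length
decreasing_by simp only [List.length_unattach, List.length_cons, Nat.lt_succ_iff]; exact le_trans (List.length_filter_le _ _) (by simp)

theorem dedupLoop_eq_aux (n : Nat) : ∀ (rest acc : List String), rest.length ≤ n →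
    dedupLoop acc rest = acc ++ dedupR rest := by
  induction n with
  | zero =>
      intro rest acc h
      have : rest = [] := List.eq_nil_of_length_eq_zero (Nat.le_zero.mp h)
      subst this; simp [dedupLoop, dedupR]
  | succ n ih =>
      intro rest acc h
      cases rest with
      | nil => simp [dedupLoop, dedupR]
      | cons x t =>
          rw [dedupLoop, dedupR,
            ih _ _ (le_trans (List.length_filter_le _ _) (Nat.le_of_succ_le_succ h))]
          simp

theorem dedupLoop_eq (acc rest : List String) : dedupLoop acc rest = acc ++ dedupR rest :=
  dedupLoop_eq_aux rest.length rest acc (Nat.le_refl _)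

theorem contains_dedupR_aux (n : Nat) : ∀ (xs : List String), xs.length ≤ n → ∀ p,
    (dedupR xs).contains p = xs.contains p := by
  induction n with
  | zero =>
      intro xs h p
      have : xs = [] := List.eq_nil_of_length_eq_zero (Nat.le_zero.mp h)
      subst this; rw [dedupR]
  | succ n ih =>
      intro xs h p
      cases xs with
      | nil => rw [dedupR]
      | cons x t =>
          rw [dedupR]
          by_cases hp : p = x
          · simp [hp]
          · have := ih (t.filter (fun y => y ≠ x))
              (le_trans (List.length_filter_le _ _) (Nat.le_of_succ_le_succ h)) p
            simp only [List.contains_cons, this]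
            simp [List.contains_eq_mem, hp]

theorem contains_dedupR (xs : List String) (p : String) :
    (dedupR xs).contains p = xs.contains p :=
  contains_dedupR_aux xs.length xs (Nat.le_refl _) p

theorem dedupR_filter_aux (n : Nat) : ∀ (xs : List String), xs.length ≤ n → ∀ (q : String → Bool),
    dedupR (xs.filter q) = (dedupR xs).filter q := by
  induction n with
  | zero =>
      intro xs h q
      have : xs = [] := List.eq_nil_of_length_eq_zero (Nat.le_zero.mp h)
      subst this; simp [dedupR]
  | succ n ih =>
      intro xs h q
      cases xs with
      | nil => simp [dedupR]
      | cons x t =>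
          have ht : t.length ≤ n := Nat.le_of_succ_le_succ h
          by_cases hq : q x
          · rw [List.filter_cons_of_pos hq, dedupR, dedupR, List.filter_cons_of_pos hq,
              ← ih _ (le_trans (List.length_filter_le _ _) ht) q]
            congr 1
            rw [List.filter_filter, List.filter_filter]
            congr 1
            apply List.filter_congr
            intro y _
            exact Bool.and_comm _ _
          · rw [List.filter_cons_of_neg (by simpa using hq), dedupR,
              List.filter_cons_of_neg (by simpa using hq),
              ← ih _ (le_trans (List.length_filter_le _ _) ht) q,
              List.filter_filter]
            congr 1
            apply (List.filter_congr _).symm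
            intro y hy
            by_cases hyx : y = x
            · subst hyx; simp [hq]
            · simp [hyx]

theorem dedupR_filter (q : String → Bool) (xs : List String) :
    dedupR (xs.filter q) = (dedupR xs).filter q :=
  dedupR_filter_aux xs.length xs (Nat.le_refl _) q

theorem foldA_eq (xs : List String) : ∀ acc : List String,
    xs.foldl (fun out item => if out.contains item then out else out ++ [item]) acc
      = acc ++ dedupR (xs.filter (fun y => !acc.contains y)) := by
  induction xs with
  | nil => intro acc; simp [dedupR]
  | cons x xs ih =>
      intro acc
      rw [List.foldl_cons]
      by_cases h : acc.contains x
      · rw [if_pos h, ih]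
        have hx : x ∈ acc := by simpa [List.contains_eq_mem] using h
        simp [hx]
      · rw [if_neg h, ih]
        rw [List.filter_cons_of_pos (by simpa [List.contains_eq_mem] using h), dedupR,
          List.filter_filter]
        have hfil : xs.filter (fun y => !(acc ++ [x]).contains y)
            = xs.filter (fun a => decide (a ≠ x) && !acc.contains a) := by
          apply List.filter_congr
          intro y _
          simp [List.contains_eq_mem, Bool.and_comm, eq_comm]
        rw [hfil]
        simp

-- ===== VERDICT (by name: the statement is the Claim_ definition above) =====
theorem ordered_candidates_spec : Claim_equal_ordered_candidates := by
  intro candidates preferred _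
  show _ = _
  unfold ordered_candidates ordered_candidates_alt normalize_chain
  simp only [dedupLoop_eq, List.nil_append]
  set raw := PySem.Str.lower (PySem.Str.strip (if preferred == "" then "" else preferred)) with hraw
  set pref := PySem.Dict.getD CHAIN_ALIASES raw raw with hpref
  by_cases h : pref ≠ "" ∧ candidates.contains pref
  · have h' : pref ≠ "" ∧ (dedupR candidates).contains pref := by
      rw [contains_dedupR]; exact h
    rw [if_pos h, if_pos h', foldA_eq]
    have hfil : candidates.filter (fun y => !([pref] : List String).contains y)
        = candidates.filter (fun y => y ≠ pref) := by
      apply List.filter_congr; intro y _; simp [List.contains_eq_mem]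
    rw [hfil, dedupR_filter]
    rfl
  · have h' : ¬ (pref ≠ "" ∧ (dedupR candidates).contains pref) := by
      rw [contains_dedupR]; exact h
    rw [if_neg h, if_neg h', foldA_eq]
    simp
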